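-- pv_equiv track=rewrite | github.com/cocos56/000DealVideoAndFilesTool | FN.py | analyzeFN
-- ===== SOURCE A (Python) =====
-- def analyzeFN(s):
-- 	'''
-- 	传入文件名s，返回t，其中t[0] 文件路径, t[1] 文件名（不含后缀）, t[2] 文件后缀（含'.'）
-- 	s = [
-- 		'01_考研形势',
-- 		'01_考研形势.mp4',
-- 		'D:\\01_考研形势',
-- 		'D:\\01_考研形势.mp4'
-- 	]
-- 	'''
--
-- 	t = ['', '', '']  # t[0] 文件路径, t[1] 文件名（不含后缀）, t[2] 文件后缀（含'.'）
-- 	length = len(s)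
--
-- 	if (length == 0):
-- 		return t
--
-- 	while (s[length - 1] != '\\'):
-- 		if (s[length - 1] == '.'):
-- 			break
-- 		elif (length == 1):
-- 			t[1] = s  # 传入的字符串为纯文件名
-- 			return t
-- 		length -= 1
--
-- 	if (s[length - 1] == '.'):  # 传入的字符串含后缀名
-- 		t[2] = s[length - 1:]
-- 		s = s[:length - 1]
-- 		length -= 1
-- 	elif (s[length - 1] == '\\'):  # 传入的字符串不含后缀名
-- 		t[1] = s[length:]
-- 		t[0] = s[:length]
-- 		return t
--
-- 	if (len(s) == 0):
-- 		return t
-- 	while (s[length - 1] != '\\'):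
-- 		if (length == 1):
-- 			t[1] = s
-- 			return t
-- 		length -= 1
-- 	t[1] = s[length:]
-- 	t[0] = s[:length]
-- 	return t
-- ===== SOURCE B (Python) =====
-- def analyzeFN(s):
--     b = s.rfind('\\')
--     d = s.rfind('.')
--     t = ['', '', '']
--     t[0] = s[:b + 1]
--     if d > b:
--         t[1] = s[b + 1:d]
--         t[2] = s[d:]
--     else:
--         t[1] = s[b + 1:]
--     return t
-- ===== Notes on version B (the rewrite author's own statement) =====
-- stated objective: idiomatic
-- what changed: Replaced A's two character-by-character backward scan loops and multi-phase early-return flow with two rfind calls and a single index comparison that selects the slices.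
import Mathlib
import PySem

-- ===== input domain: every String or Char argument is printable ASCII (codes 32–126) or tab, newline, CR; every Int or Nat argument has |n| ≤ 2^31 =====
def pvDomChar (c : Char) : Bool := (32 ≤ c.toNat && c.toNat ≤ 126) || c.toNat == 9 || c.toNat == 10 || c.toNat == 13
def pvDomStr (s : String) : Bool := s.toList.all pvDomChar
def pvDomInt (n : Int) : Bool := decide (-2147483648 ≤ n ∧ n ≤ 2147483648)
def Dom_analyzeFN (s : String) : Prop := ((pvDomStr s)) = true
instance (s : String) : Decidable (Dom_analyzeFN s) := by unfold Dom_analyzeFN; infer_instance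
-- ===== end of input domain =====

-- B replaces A's two backward character scans and early-return phases with two rfind calls
-- and one index comparison (idiomatic; measured faster by constant factor). A and B are total and fully equivalent.


-- ===== PORT A =====
-- first while loop of A: scans s[length-1], s[length-2], … for '\' or '.';
-- `none` = the early `t[1] = s; return t` at length == 1, `some l` = loop left with this length
-- (indices are always in range in A, so List.getD is exact here)
def aLoop1 (cs : List Char) : Nat → Option Nat
  | 0 => some 0
  | k + 1 =>
    if cs.getD k ' ' ≠ '\\' then
      if cs.getD k ' ' = '.' then some (k + 1)
      else if k + 1 = 1 then none
      else aLoop1 cs k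
    else some (k + 1)

-- second while loop of A: scans for '\' only; `none` = the `t[1] = s; return t` at length == 1
def aLoop2 (cs : List Char) : Nat → Option Nat
  | 0 => some 0
  | k + 1 =>
    if cs.getD k ' ' ≠ '\\' then
      if k + 1 = 1 then none
      else aLoop2 cs k
    else some (k + 1)

-- slices s[:m] / s[m:] with 0 ≤ m ≤ len(s) are exactly take/drop
def analyzeFN (s : String) : List String :=
  let cs := s.toList
  let length := cs.length
  if length = 0 then ["", "", ""]
  else
    match aLoop1 cs length with
    | none => ["", s, ""]                    -- pure file name
    | some l =>
      if cs.getD (l - 1) ' ' = '.' then      -- extension present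
        let t2 := String.ofList (cs.drop (l - 1))
        let cs' := cs.take (l - 1)
        let l' := l - 1
        if cs'.length = 0 then ["", "", t2]
        else
          match aLoop2 cs' l' with
          | none => ["", String.ofList cs', t2]
          | some l2 => [String.ofList (cs'.take l2), String.ofList (cs'.drop l2), t2]
      else                                   -- s[l-1] == '\' : no extension
        [String.ofList (cs.take l), String.ofList (cs.drop l), ""]

-- ===== PORT B =====
-- s.rfind(c) for a single character: index of last occurrence below fuel l, or -1
def rfindChar (cs : List Char) (c : Char) : Nat → Int
  | 0 => -1
  | k + 1 => if cs.getD k ' ' = c then (k : Int) else rfindChar cs c k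

-- slices s[:b+1], s[b+1:d], s[b+1:], s[d:] — all indices are ≥ 0 and ≤ len(s), so take/drop are exact
def analyzeFN_alt (s : String) : List String :=
  let cs := s.toList
  let b := rfindChar cs '\\' cs.length
  let d := rfindChar cs '.' cs.length
  let t0 := String.ofList (cs.take (b + 1).toNat)
  if d > b then
    [t0, String.ofList ((cs.take d.toNat).drop (b + 1).toNat), String.ofList (cs.drop d.toNat)]
  else
    [t0, String.ofList (cs.drop (b + 1).toNat), ""]

-- ===== PRECONDITION & SPEC =====
def Spec_analyzeFN (s : String) (out : List String) : Prop := out = analyzeFN_alt s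
instance (s : String) (out : List String) : Decidable (Spec_analyzeFN s out) := by unfold Spec_analyzeFN; infer_instance

-- ===== CLAIM (what is proved, stated in full; the proofs are below) =====
def Claim_equal_analyzeFN : Prop := ∀ (s : String), Dom_analyzeFN s → Spec_analyzeFN s (analyzeFN s)

-- ===== LEMMAS AND PROOFS =====

theorem rfindChar_lt (cs : List Char) (c : Char) (l : Nat) : rfindChar cs c l < l := by
  induction l with
  | zero => simp [rfindChar]
  | succ k ih =>
    simp only [rfindChar]
    split
    · omega
    · omega

theorem rfindChar_ge (cs : List Char) (c : Char) (l : Nat) : -1 ≤ rfindChar cs c l := by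
  induction l with
  | zero => simp [rfindChar]
  | succ k ih =>
    simp only [rfindChar]
    split
    · omega
    · exact ih

theorem rfindChar_getD (cs : List Char) (c : Char) (l : Nat)
    (h : 0 ≤ rfindChar cs c l) : cs.getD (rfindChar cs c l).toNat ' ' = c := by
  induction l with
  | zero => simp [rfindChar] at h
  | succ k ih =>
    by_cases hc : cs.getD k ' ' = c
    · simp only [rfindChar, if_pos hc, Int.toNat_natCast]
      exact hc
    · simp only [rfindChar, if_neg hc] at h ⊢
      exact ih h

theorem rfindChar_step (cs : List Char) (c : Char) (k : Nat) (h : cs.getD k ' ' ≠ c) :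
    rfindChar cs c (k + 1) = rfindChar cs c k := by
  simp only [rfindChar, if_neg h]

theorem rfindChar_back (cs : List Char) (c : Char) (l l' : Nat)
    (hle : l' ≤ l) (hlt : rfindChar cs c l < (l' : Int)) :
    rfindChar cs c l' = rfindChar cs c l := by
  induction l with
  | zero =>
    have : l' = 0 := by omega
    subst this; rfl
  | succ k ih =>
    rcases Nat.eq_or_lt_of_le hle with h | h
    · rw [h]
    · have hk : l' ≤ k := by omega
      by_cases hc : cs.getD k ' ' = c
      · exfalso
        have hv : rfindChar cs c (k + 1) = (k : Int) := by
          simp only [rfindChar, if_pos hc]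
        rw [hv] at hlt; omega
      · rw [rfindChar_step cs c k hc] at hlt ⊢
        exact ih hk hlt

theorem rfindChar_take (cs : List Char) (c : Char) (m l : Nat) (h : l ≤ m) :
    rfindChar (cs.take m) c l = rfindChar cs c l := by
  induction l with
  | zero => rfl
  | succ k ih =>
    have hget : (cs.take m).getD k ' ' = cs.getD k ' ' := by
      have hkm : k < m := by omega
      simp [List.getD_eq_getElem?_getD, hkm]
    simp only [rfindChar, hget]
    rw [ih (by omega)]

-- A's first loop finds the last index below l carrying '\\' or '.' (as a max of rfinds), or none
theorem aLoop1_eq (cs : List Char) (l : Nat) (hl : 1 ≤ l) :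
    aLoop1 cs l =
      (if 0 ≤ max (rfindChar cs '\\' l) (rfindChar cs '.' l)
       then some ((max (rfindChar cs '\\' l) (rfindChar cs '.' l)).toNat + 1)
       else none) := by
  induction l with
  | zero => omega
  | succ k ih =>
    by_cases hb : cs.getD k ' ' = '\\'
    · have h1 : rfindChar cs '\\' (k + 1) = (k : Int) := by
        simp only [rfindChar, if_pos hb]
      have h2 := rfindChar_lt cs '.' (k + 1)
      have hmax : max (rfindChar cs '\\' (k + 1)) (rfindChar cs '.' (k + 1)) = (k : Int) := by
        rw [h1]; omega
      rw [hmax]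
      simp only [aLoop1, if_neg (not_not_intro hb)]
      rw [if_pos (by omega)]
      simp
    · by_cases hd : cs.getD k ' ' = '.'
      · have h1 : rfindChar cs '.' (k + 1) = (k : Int) := by
          simp only [rfindChar, if_pos hd]
        have h2 := rfindChar_lt cs '\\' (k + 1)
        have hmax : max (rfindChar cs '\\' (k + 1)) (rfindChar cs '.' (k + 1)) = (k : Int) := by
          rw [h1]; omega
        rw [hmax]
        simp only [aLoop1, if_pos hb, if_pos hd]
        rw [if_pos (by omega)]
        simp
      · rw [rfindChar_step cs '\\' k hb, rfindChar_step cs '.' k hd]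
        rcases Nat.eq_or_lt_of_le hl with h1 | h1
        · have hk0 : k = 0 := by omega
          subst hk0
          simp only [aLoop1, rfindChar, if_pos hb, if_neg hd]
          norm_num
        · have hk1 : 1 ≤ k := by omega
          rw [← ih hk1]
          simp only [aLoop1, if_pos hb, if_neg hd]
          rw [if_neg (by omega)]

-- A's second loop finds the last '\\' below l, or none
theorem aLoop2_eq (cs : List Char) (l : Nat) (hl : 1 ≤ l) :
    aLoop2 cs l =
      (if 0 ≤ rfindChar cs '\\' l then some ((rfindChar cs '\\' l).toNat + 1) else none) := by
  induction l with
  | zero => omega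
  | succ k ih =>
    by_cases hb : cs.getD k ' ' = '\\'
    · have h1 : rfindChar cs '\\' (k + 1) = (k : Int) := by
        simp only [rfindChar, if_pos hb]
      rw [h1]
      simp only [aLoop2, if_neg (not_not_intro hb)]
      rw [if_pos (by omega)]
      simp
    · rw [rfindChar_step cs '\\' k hb]
      rcases Nat.eq_or_lt_of_le hl with h1 | h1
      · have hk0 : k = 0 := by omega
        subst hk0
        simp only [aLoop2, rfindChar, if_pos hb]
        norm_num
      · have hk1 : 1 ≤ k := by omega
        rw [← ih hk1]
        simp only [aLoop2, if_pos hb]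
        rw [if_neg (by omega)]

theorem analyzeFN_eq_alt (s : String) : analyzeFN s = analyzeFN_alt s := by
  simp only [analyzeFN, analyzeFN_alt]
  set cs := s.toList with hcs
  set n := cs.length with hn
  by_cases hn0 : n = 0
  · have hc0 : cs = [] := List.length_eq_zero_iff.mp (by omega)
    rw [if_pos hn0, hn0]
    simp only [rfindChar, hc0]
    norm_num
  · have hn1 : 1 ≤ n := by omega
    set b := rfindChar cs '\\' n with hbdef
    set d := rfindChar cs '.' n with hddef
    have hbge : -1 ≤ b := hbdef ▸ rfindChar_ge cs '\\' n
    have hdge : -1 ≤ d := hddef ▸ rfindChar_ge cs '.' n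
    have hblt : b < (n : Int) := hbdef ▸ rfindChar_lt cs '\\' n
    have hdlt : d < (n : Int) := hddef ▸ rfindChar_lt cs '.' n
    rw [if_neg hn0, aLoop1_eq cs n hn1, ← hbdef, ← hddef]
    rcases lt_trichotomy d b with hdb | hdb | hdb
    · -- b > d : last separator is '\\', no extension
      have hb0 : 0 ≤ b := by omega
      have hbc : cs.getD b.toNat ' ' = '\\' := by
        rw [hbdef]; exact rfindChar_getD cs '\\' n (by rw [← hbdef]; exact hb0)
      have hne : ¬ (cs.getD (b.toNat + 1 - 1) ' ' = '.') := by
        simp only [Nat.add_sub_cancel, hbc]; decide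
      have htn : (b + 1).toNat = b.toNat + 1 := by omega
      rw [show max b d = b by omega, if_pos hb0]
      dsimp only
      rw [if_neg hne, if_neg (by omega : ¬ d > b), htn]
    · -- d = b can only happen for -1 = -1 : pure file name
      by_cases hb0 : 0 ≤ b
      · exfalso
        have h1 : cs.getD b.toNat ' ' = '\\' := by
          rw [hbdef]; exact rfindChar_getD cs '\\' n (by rw [← hbdef]; exact hb0)
        have h2 : cs.getD d.toNat ' ' = '.' := by
          rw [hddef]; exact rfindChar_getD cs '.' n (by rw [← hddef]; omega)
        rw [hdb, h1] at h2
        exact absurd h2 (by decide)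
      · have hb1 : b = -1 := by omega
        have hd1 : d = -1 := by omega
        rw [if_neg (by omega), if_neg (by omega : ¬ d > b), hb1]
        dsimp only
        rw [show ((-1 : Int) + 1).toNat = 0 from rfl, List.drop_zero, List.take_zero, hcs,
            String.ofList_toList]
    · -- d > b : extension present
      have hd0 : 0 ≤ d := by omega
      have hdc : cs.getD d.toNat ' ' = '.' := by
        rw [hddef]; exact rfindChar_getD cs '.' n (by rw [← hddef]; exact hd0)
      have hdcc : cs.getD (d.toNat + 1 - 1) ' ' = '.' := by simpa using hdc
      rw [if_pos (by omega : 0 ≤ max b d)]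
      dsimp only
      rw [show max b d = d by omega, if_pos hdcc, if_pos hdb, Nat.add_sub_cancel]
      by_cases hdz : d.toNat = 0
      · -- extension starts at index 0: path and name both empty
        have hb10 : (b + 1).toNat = 0 := by omega
        rw [if_pos (by simp [hdz])]
        rw [hdz, hb10]
        simp
      · -- scan the prefix before the extension for '\\'
        have hd1 : 1 ≤ d.toNat := by omega
        have htklen : (cs.take d.toNat).length = d.toNat := by
          simp; omega
        rw [if_neg (by rw [htklen]; omega)]
        have hpref : rfindChar (cs.take d.toNat) '\\' d.toNat = b := by
          rw [rfindChar_take cs '\\' d.toNat d.toNat le_rfl, hbdef]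
          exact rfindChar_back cs '\\' n d.toNat (by omega) (by rw [← hbdef]; omega)
        rw [aLoop2_eq (cs.take d.toNat) d.toNat hd1, hpref]
        by_cases hb0 : 0 ≤ b
        · have htn : (b + 1).toNat = b.toNat + 1 := by omega
          have htt : (cs.take d.toNat).take (b.toNat + 1) = cs.take (b.toNat + 1) := by
            rw [List.take_take]
            congr 1
            omega
          rw [if_pos hb0]
          dsimp only
          rw [htn, htt]
        · have hb10 : (b + 1).toNat = 0 := by omega
          rw [if_neg hb0]
          dsimp only
          rw [hb10, List.drop_zero, List.take_zero]

-- ===== VERDICT (by name: the statement is the Claim_ definition above) =====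
theorem analyzeFN_spec : Claim_equal_analyzeFN := by
  intro s _
  exact analyzeFN_eq_alt s
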